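-- pv_equiv track=rewrite | github.com/muhammettan28/kangalguard-dynamic | kangal_collector.py | count_triple_chains
-- ===== SOURCE A (Python) =====
-- def count_triple_chains(tags: list) -> int:
--     """3 aşamalı malware zinciri kaç kez oluştu?"""
--     TRIPLE_CHAINS = [
--         ("DEX_LOAD",   "REFLECT",  "EXEC"),
--         ("ANTI",       "CRYPTO",   "NETWORK"),
--         ("ROOT_CHECK", "DEX_LOAD", "EXEC"),
--         ("REFLECT",    "CRYPTO",   "NETWORK"),
--         ("DEX_LOAD",   "CRYPTO",   "NETWORK"),
--     ]
--     count = 0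
--     for a, b, c in TRIPLE_CHAINS:
--         for i, tag in enumerate(tags):
--             if tag == a:
--                 rest = tags[i+1:]
--                 for j, tag2 in enumerate(rest):
--                     if tag2 == b:
--                         if c in rest[j+1:]:
--                             count += 1
--                             break
--     return count
-- ===== SOURCE B (Python) =====
-- def count_triple_chains(tags: list) -> int:
--     """3 aşamalı malware zinciri kaç kez oluştu?"""
--     TRIPLE_CHAINS = [
--         ("DEX_LOAD",   "REFLECT",  "EXEC"),
--         ("ANTI",       "CRYPTO",   "NETWORK"),
--         ("ROOT_CHECK", "DEX_LOAD", "EXEC"),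
--         ("REFLECT",    "CRYPTO",   "NETWORK"),
--         ("DEX_LOAD",   "CRYPTO",   "NETWORK"),
--     ]
--     total = 0
--     for a, b, c in TRIPLE_CHAINS:
--         has_c = False
--         has_bc = False
--         cnt = 0
--         for tag in reversed(tags):
--             if tag == a and has_bc:
--                 cnt += 1
--             if tag == b and has_c:
--                 has_bc = True
--             if tag == c:
--                 has_c = True
--         total += cnt
--     return total
-- ===== Notes on version B (the rewrite author's own statement) =====
-- stated objective: alternative
-- what changed: Replaced the per-occurrence forward rescan (for each a-tag, scan the suffix for b, then a membership test for c) by a single backward pass per chain maintaining 'c seen' / 'b-then-c seen' flags that counts a-tags in one sweep.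
import Mathlib
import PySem

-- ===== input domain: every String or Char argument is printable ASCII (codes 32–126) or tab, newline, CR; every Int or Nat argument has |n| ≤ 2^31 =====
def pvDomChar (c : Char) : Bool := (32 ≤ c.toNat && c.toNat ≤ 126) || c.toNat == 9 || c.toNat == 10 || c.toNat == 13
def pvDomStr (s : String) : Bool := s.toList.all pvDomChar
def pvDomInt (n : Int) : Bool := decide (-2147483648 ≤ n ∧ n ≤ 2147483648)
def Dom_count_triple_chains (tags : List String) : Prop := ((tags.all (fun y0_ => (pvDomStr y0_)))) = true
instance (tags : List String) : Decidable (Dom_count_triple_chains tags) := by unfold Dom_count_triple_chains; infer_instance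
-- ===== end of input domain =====

-- B replaces A's per-occurrence forward rescans by a single backward pass per chain with seen-flags (alternative algorithm).

-- ===== PORT A =====
def pvTripleChains : List (String × String × String) :=
  [("DEX_LOAD", "REFLECT", "EXEC"),
   ("ANTI", "CRYPTO", "NETWORK"),
   ("ROOT_CHECK", "DEX_LOAD", "EXEC"),
   ("REFLECT", "CRYPTO", "NETWORK"),
   ("DEX_LOAD", "CRYPTO", "NETWORK")]

-- inner 'for j, tag2 in enumerate(rest)' with break; in this structural recursion over rest,
-- the slice rest[j+1:] is exactly the remaining suffix rs (exact for j ≥ 0).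
def pvInnerA (b c : String) : List String → Bool
  | [] => false
  | tag2 :: rs => if tag2 == b then (if rs.contains c then true else pvInnerA b c rs) else pvInnerA b c rs

-- middle 'for i, tag in enumerate(tags)'; rest = tags[i+1:] is the remaining suffix ts (exact).
def pvMidA (a b c : String) (count : Int) : List String → Int
  | [] => count
  | tag :: ts =>
      if tag == a then pvMidA a b c (count + (if pvInnerA b c ts then 1 else 0)) ts
      else pvMidA a b c count ts

def count_triple_chains (tags : List String) : Int :=
  pvTripleChains.foldl (fun count chain => pvMidA chain.1 chain.2.1 chain.2.2 count tags) 0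

-- ===== PORT B =====
def pvStepB (a b c : String) (st : Bool × Bool × Int) (tag : String) : Bool × Bool × Int :=
  let cnt := if tag == a && st.2.1 then st.2.2 + 1 else st.2.2
  let hasBC := if tag == b && st.1 then true else st.2.1
  let hasC := if tag == c then true else st.1
  (hasC, hasBC, cnt)

def pvChainB (a b c : String) (tags : List String) : Int :=
  (tags.reverse.foldl (pvStepB a b c) (false, false, 0)).2.2

def count_triple_chains_alt (tags : List String) : Int :=
  pvTripleChains.foldl (fun total chain => total + pvChainB chain.1 chain.2.1 chain.2.2 tags) 0

-- ===== PRECONDITION & SPEC =====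
def Spec_count_triple_chains (tags : List String) (out : Int) : Prop := out = count_triple_chains_alt tags
instance (tags : List String) (out : Int) : Decidable (Spec_count_triple_chains tags out) := by unfold Spec_count_triple_chains; infer_instance

-- ===== CLAIM (what is proved, stated in full; the proofs are below) =====
def Claim_equal_count_triple_chains : Prop := ∀ (tags : List String), Dom_count_triple_chains tags → Spec_count_triple_chains tags (count_triple_chains tags)

-- ===== LEMMAS AND PROOFS =====

theorem pvMidA_shift (a b c : String) (count : Int) (ts : List String) :
    pvMidA a b c count ts = count + pvMidA a b c 0 ts := by
  induction ts generalizing count with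
  | nil => simp [pvMidA]
  | cons t ts ih =>
    simp only [pvMidA]
    by_cases h : (t == a) = true
    · rw [if_pos h, if_pos h, ih, ih ((0:Int) + _)]; ring
    · rw [if_neg h, if_neg h, ih]

theorem pvFoldB_spec (a b c : String) (ts : List String) :
    ts.reverse.foldl (pvStepB a b c) (false, false, 0)
      = (ts.contains c, pvInnerA b c ts, pvMidA a b c 0 ts) := by
  induction ts with
  | nil => simp [pvInnerA, pvMidA]
  | cons t ts ih =>
    have : (t :: ts).reverse.foldl (pvStepB a b c) (false, false, 0)
        = pvStepB a b c (ts.reverse.foldl (pvStepB a b c) (false, false, 0)) t := by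
      simp [List.foldl_append]
    rw [this, ih]
    simp only [pvStepB, pvInnerA, pvMidA, List.contains_cons]
    by_cases ha : (t == a) = true <;> by_cases hb : (t == b) = true <;>
      by_cases hc : (t == c) = true <;> by_cases hbc : pvInnerA b c ts = true <;>
      by_cases hcc : ts.contains c = true <;>
      simp [ha, hb, hc, hbc, hcc, pvMidA_shift a b c 1] <;>
        (try refine ⟨?_, by omega⟩) <;>
        first
          | exact Or.inl (eq_of_beq hc).symm
          | (intro h; exact absurd h.symm (by simpa using hc))

theorem pvChain_eq (a b c : String) (count : Int) (tags : List String) :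
    pvMidA a b c count tags = count + pvChainB a b c tags := by
  rw [pvMidA_shift, pvChainB, pvFoldB_spec]

-- ===== VERDICT (by name: the statement is the Claim_ definition above) =====
theorem count_triple_chains_spec : Claim_equal_count_triple_chains := by
  intro tags _
  show count_triple_chains tags = count_triple_chains_alt tags
  simp [count_triple_chains, count_triple_chains_alt, pvTripleChains, List.foldl, pvChain_eq]
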